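-- pv_equiv track=rewrite | github.com/marcmiquel/WDO | src_data/stats_generation.py | group_dict_fix
-- ===== SOURCE A (Python) =====
-- def group_dict_fix(ethnic_group_types_count):
--
--     ethnic_group_types_new_dict = {}
--     for ethnic_group_type, ethnic_group_count in ethnic_group_types_count.items():
--         if ethnic_group_type == None: continue
--         if ';' in ethnic_group_type:
--             for group in ethnic_group_type.split(';'):
--                 try:
--                     ethnic_group_types_new_dict[group]=ethnic_group_types_new_dict[group]+1
--                 except:
--                     ethnic_group_types_new_dict[group]=1
--         else:
--             try:
--                 ethnic_group_types_new_dict[ethnic_group_type]=ethnic_group_types_new_dict[ethnic_group_type]+ethnic_group_count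
--             except:
--                 ethnic_group_types_new_dict[ethnic_group_type]=ethnic_group_count
--
--     return ethnic_group_types_new_dict
-- ===== SOURCE B (Python) =====
-- def group_dict_fix(ethnic_group_types_count):
--     # Pass 1: flatten into (token, weight) contribution pairs.
--     contribs = []
--     for key, count in ethnic_group_types_count.items():
--         if key is None:
--             continue
--         if ';' in key:
--             contribs.extend((group, 1) for group in key.split(';'))
--         else:
--             contribs.append((key, count))
--     # Pass 2: fold contributions into totals.
--     result = {}
--     for token, weight in contribs:
--         result[token] = result.get(token, 0) + weight
--     return result
-- ===== Notes on version B (the rewrite author's own statement) =====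
-- stated objective: alternative
-- what changed: B separates the work into a flatten pass that emits (token, weight) contribution pairs ((group,1) for each semicolon-split group, (key,count) otherwise) and a second fold pass that sums weights with get-with-default, instead of A's single loop with inline try/except dict updates.
import Mathlib
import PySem

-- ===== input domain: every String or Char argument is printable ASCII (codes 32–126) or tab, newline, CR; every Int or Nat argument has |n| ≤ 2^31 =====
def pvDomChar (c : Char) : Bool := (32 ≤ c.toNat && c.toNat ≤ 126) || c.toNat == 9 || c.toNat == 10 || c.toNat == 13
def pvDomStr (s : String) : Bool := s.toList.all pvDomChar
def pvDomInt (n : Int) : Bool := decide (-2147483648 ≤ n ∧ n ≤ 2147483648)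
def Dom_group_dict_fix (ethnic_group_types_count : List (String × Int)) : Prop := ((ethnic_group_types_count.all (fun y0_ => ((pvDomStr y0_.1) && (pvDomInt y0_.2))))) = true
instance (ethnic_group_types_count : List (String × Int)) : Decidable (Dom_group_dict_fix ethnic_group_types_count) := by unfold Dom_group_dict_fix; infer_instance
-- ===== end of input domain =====

-- pySplit s = s.split(";") (PySem.Str.split? with the nonempty literal separator ";")
def pySplitSemi (s : String) : List String := (PySem.Str.split? s ";").getD []

-- ===== PORT A =====
-- Port of A: single loop; try/except update transcribed as a match on Dict.get?.
def group_dict_fix (ethnic_group_types_count : List (String × Int)) : List (String × Int) :=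
  (ethnic_group_types_count.foldl (fun (d : PySem.Dict String Int) kv =>
      if PySem.Str.isIn ";" kv.1 then
        (pySplitSemi kv.1).foldl (fun d g =>
          match d.get? g with
          | some x => d.insert g (x + 1)
          | none   => d.insert g 1) d
      else
        match d.get? kv.1 with
        | some x => d.insert kv.1 (x + kv.2)
        | none   => d.insert kv.1 kv.2) PySem.Dict.empty).items

-- ===== PORT B =====
-- Port of B: flatten into (token, weight) contribution pairs, then fold them into totals.
def group_dict_fix_alt (ethnic_group_types_count : List (String × Int)) : List (String × Int) :=
  let contribs := ethnic_group_types_count.flatMap (fun kv =>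
    if PySem.Str.isIn ";" kv.1 then
      (pySplitSemi kv.1).map (fun g => (g, (1 : Int)))
    else [kv])
  (contribs.foldl (fun (d : PySem.Dict String Int) tw =>
      d.insert tw.1 (d.getD tw.1 0 + tw.2)) PySem.Dict.empty).items

-- ===== PRECONDITION & SPEC =====
def Spec_group_dict_fix (ethnic_group_types_count : List (String × Int)) (out : List (String × Int)) : Prop := out = group_dict_fix_alt ethnic_group_types_count
instance (ethnic_group_types_count : List (String × Int)) (out : List (String × Int)) : Decidable (Spec_group_dict_fix ethnic_group_types_count out) := by unfold Spec_group_dict_fix; infer_instance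

-- ===== CLAIM (what is proved, stated in full; the proofs are below) =====
def Claim_equal_group_dict_fix : Prop := ∀ (ethnic_group_types_count : List (String × Int)), Dom_group_dict_fix ethnic_group_types_count → Spec_group_dict_fix ethnic_group_types_count (group_dict_fix ethnic_group_types_count)

-- ===== LEMMAS AND PROOFS =====

-- adding w to an existing-or-default entry, written as a match, equals the getD form
theorem pv_step_match_eq_getD (d : PySem.Dict String Int) (k : String) (w : Int) :
    (match d.get? k with
     | some x => d.insert k (x + w)
     | none   => d.insert k w) = d.insert k (d.getD k 0 + w) := by
  cases h : d.get? k with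
  | some x => simp [PySem.Dict.getD_eq_get?_getD, h]
  | none => simp [PySem.Dict.getD_eq_get?_getD, h]

theorem pv_fold_flatMap (l : List (String × Int)) (d : PySem.Dict String Int) :
    l.foldl (fun (d : PySem.Dict String Int) kv =>
      if PySem.Str.isIn ";" kv.1 then
        (pySplitSemi kv.1).foldl (fun d g =>
          match d.get? g with
          | some x => d.insert g (x + 1)
          | none   => d.insert g 1) d
      else
        match d.get? kv.1 with
        | some x => d.insert kv.1 (x + kv.2)
        | none   => d.insert kv.1 kv.2) d
    = (l.flatMap (fun kv =>
        if PySem.Str.isIn ";" kv.1 then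
          (pySplitSemi kv.1).map (fun g => (g, (1 : Int)))
        else [kv])).foldl (fun (d : PySem.Dict String Int) tw =>
          d.insert tw.1 (d.getD tw.1 0 + tw.2)) d := by
  induction l generalizing d with
  | nil => rfl
  | cons kv l ih =>
    simp only [List.foldl_cons, List.flatMap_cons, List.foldl_append]
    rw [ih]
    congr 1
    by_cases h : PySem.Str.isIn ";" kv.1
    · simp only [h, if_true, List.foldl_map]
      induction (pySplitSemi kv.1) generalizing d with
      | nil => rfl
      | cons g gs ihg => rw [List.foldl_cons, List.foldl_cons, pv_step_match_eq_getD, ihg]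
    · simp only [h, if_neg, Bool.false_eq_true, not_false_iff, List.foldl_cons, List.foldl_nil]
      exact pv_step_match_eq_getD d kv.1 kv.2

-- ===== VERDICT (by name: the statement is the Claim_ definition above) =====
theorem group_dict_fix_spec : Claim_equal_group_dict_fix := by
  intro l _
  unfold Spec_group_dict_fix group_dict_fix group_dict_fix_alt
  rw [pv_fold_flatMap]
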